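-- pv_equiv track=rewrite | github.com/camilodev404/ScoliosisSegmentation-MS | app/services/pipeline.py | build_label_blocks
-- ===== SOURCE A (Python) =====
-- def build_label_blocks(label_indices: list[int], gap_tolerance: int = 2) -> list[list[int]]:
--     if not label_indices:
--         return []
--     blocks = [[label_indices[0]]]
--     for idx in label_indices[1:]:
--         if idx - blocks[-1][-1] <= gap_tolerance + 1:
--             blocks[-1].append(idx)
--         else:
--             blocks.append([idx])
--     return blocks
-- ===== SOURCE B (Python) =====
-- def build_label_blocks(label_indices: list[int], gap_tolerance: int = 2) -> list[list[int]]: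
--     if not label_indices:
--         return []
--     # phase 1: find the cut positions (indices where a new block must start)
--     cuts = [i for i, (prev, cur) in enumerate(zip(label_indices, label_indices[1:]), 1)
--             if cur - prev > gap_tolerance + 1]
--     # phase 2: slice the list between successive boundaries
--     bounds = [0] + cuts + [len(label_indices)]
--     return [label_indices[a:b] for a, b in zip(bounds, bounds[1:])]
-- ===== Notes on version B (the rewrite author's own statement) =====
-- stated objective: alternative
-- what changed: A grows blocks in one pass, appending each element to the last block or opening a new one; B works in two separate phases: it first collects the cut positions by scanning adjacent pairs, then builds each block as a slice of the input between successive boundaries.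
import Mathlib
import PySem

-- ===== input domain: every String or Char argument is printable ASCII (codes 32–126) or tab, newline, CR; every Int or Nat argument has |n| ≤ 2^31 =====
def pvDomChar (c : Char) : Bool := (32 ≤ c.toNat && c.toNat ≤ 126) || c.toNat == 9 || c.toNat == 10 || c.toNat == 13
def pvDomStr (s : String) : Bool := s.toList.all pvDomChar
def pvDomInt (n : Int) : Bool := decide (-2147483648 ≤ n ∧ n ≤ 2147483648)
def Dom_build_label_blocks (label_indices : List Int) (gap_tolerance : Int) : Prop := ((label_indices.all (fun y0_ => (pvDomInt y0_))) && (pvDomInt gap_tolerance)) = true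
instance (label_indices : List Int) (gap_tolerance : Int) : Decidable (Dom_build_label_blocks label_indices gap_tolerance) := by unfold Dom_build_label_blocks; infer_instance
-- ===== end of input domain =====

-- B replaces A's one-pass block-growing loop by two phases (find cut positions, then slice
-- between boundaries); same return value, same complexity (objective: alternative).


-- ===== PORT A =====
-- loop body: blocks[-1][-1] is read with getLastD (both lists are provably never empty there)
def stepA (g : Int) (blocks : List (List Int)) (idx : Int) : List (List Int) :=
  if idx - ((blocks.getLastD []).getLastD 0) ≤ g + 1 then
    blocks.dropLast ++ [blocks.getLastD [] ++ [idx]]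
  else
    blocks ++ [[idx]]

def build_label_blocks (label_indices : List Int) (gap_tolerance : Int) : List (List Int) :=
  match label_indices with
  | [] => []
  | x :: rest => rest.foldl (stepA gap_tolerance) [[x]]

-- ===== PORT B =====
-- phase 1: the cut positions i (from enumerate(zip(xs, xs[1:]), 1)) where the adjacent gap is too large
def pvCuts (xs : List Int) (g : Int) : List Int :=
  ((PySem.List.enumerate (xs.zip (PySem.List.slice xs (some 1) none)) 1).filter
    (fun p => decide (p.2.2 - p.2.1 > g + 1))).map (fun p => p.1)

-- phase 2: bounds = [0] + cuts + [len]; slice between successive bounds (zip(bounds, bounds[1:]))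
def build_label_blocks_alt (label_indices : List Int) (gap_tolerance : Int) : List (List Int) :=
  if label_indices = [] then []
  else
    ((0 :: (pvCuts label_indices gap_tolerance ++ [(label_indices.length : Int)])).zip
        (PySem.List.slice (0 :: (pvCuts label_indices gap_tolerance ++ [(label_indices.length : Int)])) (some 1) none)).map
      (fun p => PySem.List.slice label_indices (some p.1) (some p.2))

-- ===== PRECONDITION & SPEC =====
def Spec_build_label_blocks (label_indices : List Int) (gap_tolerance : Int) (out : List (List Int)) : Prop := out = build_label_blocks_alt label_indices gap_tolerance
instance (label_indices : List Int) (gap_tolerance : Int) (out : List (List Int)) : Decidable (Spec_build_label_blocks label_indices gap_tolerance out) := by unfold Spec_build_label_blocks; infer_instance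

-- ===== CLAIM (what is proved, stated in full; the proofs are below) =====
def Claim_equal_build_label_blocks : Prop := ∀ (label_indices : List Int) (gap_tolerance : Int), Dom_build_label_blocks label_indices gap_tolerance → Spec_build_label_blocks label_indices gap_tolerance (build_label_blocks label_indices gap_tolerance)

-- ===== LEMMAS AND PROOFS =====

-- the common recursive description: the block starting at x, and the remaining blocks
def grpP (g : Int) (x : Int) : List Int → List Int × List (List Int)
  | [] => ([x], [])
  | y :: ys =>
    let p := grpP g y ys
    if y - x ≤ g + 1 then (x :: p.1, p.2) else ([x], p.1 :: p.2)

theorem foldA (g : Int) : ∀ (xs : List Int) (bs : List (List Int)) (c : List Int) (x : Int),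
    List.foldl (stepA g) (bs ++ [c ++ [x]]) xs
      = bs ++ ((c ++ (grpP g x xs).1) :: (grpP g x xs).2) := by
  intro xs
  induction xs with
  | nil => intro bs c x; simp [grpP]
  | cons y ys ih =>
      intro bs c x
      simp only [List.foldl_cons, stepA]
      rw [List.getLastD_concat, List.getLastD_concat, List.dropLast_concat]
      by_cases h : y - x ≤ g + 1
      · rw [if_pos h, ih bs (c ++ [x]) y]
        simp [grpP, h]
      · rw [if_neg h]
        have hstep := ih (bs ++ [c ++ [x]]) [] y
        simp only [List.nil_append] at hstep
        rw [hstep]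
        simp [grpP, h]

theorem enumerate_shift {α : Type} (l : List α) : ∀ (s : Int),
    PySem.List.enumerate l (s + 1) = (PySem.List.enumerate l s).map (fun p => (p.1 + 1, p.2)) := by
  induction l with
  | nil => intro s; simp [PySem.List.enumerate_nil]
  | cons a t ih =>
      intro s
      rw [PySem.List.enumerate_cons, PySem.List.enumerate_cons, ih (s + 1)]
      simp

theorem cutsShift (g x y : Int) (ys : List Int) :
    pvCuts (x :: y :: ys) g
      = (if y - x > g + 1 then [1] else []) ++ (pvCuts (y :: ys) g).map (· + 1) := by
  unfold pvCuts
  rw [PySem.List.slice_from_one, PySem.List.slice_from_one]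
  simp only [List.tail_cons, List.zip_cons_cons, PySem.List.enumerate_cons]
  rw [enumerate_shift ((y :: ys).zip ys) 1, List.filter_cons]
  by_cases h : g + 1 < y - x <;>
    simp [h, List.filter_map, List.map_map, Function.comp_def]

theorem cuts_pos (xs : List Int) (g : Int) : ∀ c ∈ pvCuts xs g, 1 ≤ c := by
  intro c hc
  unfold pvCuts at hc
  simp only [List.mem_map, List.mem_filter] at hc
  obtain ⟨p, ⟨hp, _⟩, rfl⟩ := hc
  rw [PySem.List.mem_enumerate_iff] at hp
  obtain ⟨k, _, rfl⟩ := hp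
  simp

theorem sliceShift (x a b : Int) (xs : List Int) (ha : 0 ≤ a) (hb : 0 ≤ b) :
    PySem.List.slice (x :: xs) (some (a + 1)) (some (b + 1)) = PySem.List.slice xs (some a) (some b) := by
  rw [PySem.List.slice_toNat _ (show (0:Int) ≤ a + 1 by omega) (show (0:Int) ≤ b + 1 by omega),
      PySem.List.slice_toNat _ ha hb]
  have h1 : (a + 1).toNat = a.toNat + 1 := by omega
  have h2 : (b + 1).toNat = b.toNat + 1 := by omega
  rw [h1, h2, List.drop_succ_cons]
  congr 1
  omega

theorem sliceZero (x b : Int) (xs : List Int) (hb : 0 ≤ b) :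
    PySem.List.slice (x :: xs) (some 0) (some (b + 1)) = x :: PySem.List.slice xs (some 0) (some b) := by
  rw [PySem.List.slice_toNat _ (by norm_num) (show (0:Int) ≤ b + 1 by omega),
      PySem.List.slice_toNat _ le_rfl hb]
  have h2 : (b + 1).toNat = b.toNat + 1 := by omega
  simp [h2, List.take_succ_cons]

theorem altB (g : Int) : ∀ (xs : List Int) (x : Int),
    build_label_blocks_alt (x :: xs) g = (grpP g x xs).1 :: (grpP g x xs).2 := by
  intro xs
  induction xs with
  | nil =>
      intro x
      unfold build_label_blocks_alt pvCuts
      rw [if_neg (List.cons_ne_nil x []), PySem.List.slice_from_one, PySem.List.slice_from_one]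
      simp only [List.tail_cons, List.zip_nil_right, PySem.List.enumerate_nil, List.filter_nil,
        List.map_nil, List.nil_append, List.zip_cons_cons, List.map_cons]
      rw [PySem.List.slice_toNat _ le_rfl (by positivity)]
      simp [grpP]
  | cons y ys ih =>
      intro x
      have hbody := ih y
      unfold build_label_blocks_alt at hbody
      rw [if_neg (List.cons_ne_nil y ys), PySem.List.slice_from_one] at hbody
      simp only [List.tail_cons] at hbody
      unfold build_label_blocks_alt
      rw [if_neg (List.cons_ne_nil x (y :: ys)), PySem.List.slice_from_one]
      simp only [List.tail_cons]
      rw [cutsShift]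
      set C : List Int := pvCuts (y :: ys) g with hC
      set m : Int := ((y :: ys).length : Int) with hm
      have hlen : (((x :: y :: ys).length : Nat) : Int) = m + 1 := by
        rw [hm]; push_cast [List.length_cons]; ring
      rw [hlen]
      set L : List Int := C ++ [m] with hL
      have hLpos : ∀ c ∈ L, 0 ≤ c := by
        intro c hc
        rw [hL, List.mem_append] at hc
        rcases hc with hc | hc
        · have := cuts_pos (y :: ys) g c (hC ▸ hc); omega
        · simp at hc; rw [hc, hm]; positivity
      have hmapL : C.map (· + 1) ++ [m + 1] = L.map (· + 1) := by
        rw [hL]; simp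
      by_cases h : g + 1 < y - x
      · -- gap too large: a cut right after x, block [x], then the blocks of (y :: ys) shifted
        rw [if_pos (show y - x > g + 1 from h)]
        simp only [List.cons_append, List.nil_append]
        rw [hmapL, List.zip_cons_cons]
        rw [show ((1 : Int) :: L.map (· + 1)) = (0 :: L).map (· + 1) from by simp]
        rw [List.zip_map]
        simp only [List.map_cons, List.map_map]
        have hfirst : PySem.List.slice (x :: y :: ys) (some 0) (some 1) = [x] := by
          rw [PySem.List.slice_toNat _ le_rfl (by norm_num)]
          simp
        rw [hfirst]
        have hcongr : ∀ p ∈ (0 :: L).zip L,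
            ((fun p => PySem.List.slice (x :: y :: ys) (some p.1) (some p.2)) ∘
              (Prod.map (· + 1) (· + 1))) p
              = PySem.List.slice (y :: ys) (some p.1) (some p.2) := by
          intro p hp
          have h12 := List.of_mem_zip hp
          have h1 : 0 ≤ p.1 := by
            rcases List.mem_cons.mp h12.1 with h0 | h0
            · rw [h0]
            · exact hLpos _ h0
          simpa [Prod.map] using sliceShift x p.1 p.2 (y :: ys) h1 (hLpos _ h12.2)
        rw [List.map_congr_left hcongr, hbody]
        simp [grpP, show ¬ (y - x ≤ g + 1) by omega]
      · -- no cut: x joins the first block of (y :: ys)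
        rw [if_neg (show ¬ (y - x > g + 1) from h)]
        simp only [List.nil_append]
        rw [hmapL]
        obtain ⟨c, L', hL'⟩ : ∃ c L', L = c :: L' := by
          cases hLc : L with
          | nil => rw [hL] at hLc; simp at hLc
          | cons c L' => exact ⟨c, L', rfl⟩
        have hc0 : 0 ≤ c := hLpos c (by simp [hL'])
        have hL'pos : ∀ d ∈ L', 0 ≤ d := fun d hd => hLpos d (by simp [hL', hd])
        rw [hL'] at hbody ⊢
        simp only [List.zip_cons_cons, List.map_cons] at hbody
        rw [List.cons_eq_cons] at hbody
        obtain ⟨hhead, htail⟩ := hbody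
        rw [show ((c :: L').map (· + 1)) = (c + 1) :: L'.map (· + 1) from by simp]
        rw [List.zip_cons_cons]
        rw [show ((c + 1 : Int) :: L'.map (· + 1)) = (c :: L').map (· + 1) from by simp]
        rw [List.zip_map]
        simp only [List.map_cons, List.map_map]
        have hcongr : ∀ p ∈ (c :: L').zip L',
            ((fun p => PySem.List.slice (x :: y :: ys) (some p.1) (some p.2)) ∘
              (Prod.map (· + 1) (· + 1))) p
              = PySem.List.slice (y :: ys) (some p.1) (some p.2) := by
          intro p hp
          have h12 := List.of_mem_zip hp
          have h1 : 0 ≤ p.1 := by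
            rcases List.mem_cons.mp h12.1 with h0 | h0
            · rw [h0]; exact hc0
            · exact hL'pos _ h0
          simpa [Prod.map] using sliceShift x p.1 p.2 (y :: ys) h1 (hL'pos _ h12.2)
        rw [List.map_congr_left hcongr]
        rw [sliceZero _ _ _ hc0, hhead, htail]
        simp [grpP, show y - x ≤ g + 1 by omega]

-- ===== VERDICT (by name: the statement is the Claim_ definition above) =====
theorem build_label_blocks_spec : Claim_equal_build_label_blocks := by
  intro label_indices gap_tolerance _
  unfold Spec_build_label_blocks
  cases label_indices with
  | nil => simp [build_label_blocks, build_label_blocks_alt]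
  | cons x rest =>
      show List.foldl (stepA gap_tolerance) [[x]] rest = _
      have hfold := foldA gap_tolerance rest [] [] x
      simp only [List.nil_append] at hfold
      rw [hfold, altB]
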